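-- pv_equiv track=rewrite | github.com/Muhammadismail30/nge-codewars | 10-esrever.py | esrever
-- ===== SOURCE A (Python) =====
-- def esrever(st):
--     # Separate punctuation at the end
--     if st and st[-1] in ('!', '?', '.'):
--         punct = st[-1]
--         st = st[:-1]
--     else:
--         punct = ''
--     # Reverse words and letters in words
--     words = st.split()
--     reversed_words = [word[::-1] for word in words[::-1]]
--     result = ' '.join(reversed_words) + punct
--     return result
-- ===== SOURCE B (Python) =====
-- def esrever(st):
--     # B: one global character reversal replaces "reverse word list + reverse each word";
--     # split() of the reversed string yields the same tokens.
--     penult = st[:-1]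
--     if st and st[-1] in '!?.':
--         return ' '.join(penult[::-1].split()) + st[-1]
--     return ' '.join(st[::-1].split())
-- ===== Notes on version B (the rewrite author's own statement) =====
-- stated objective: simpler
-- what changed: Instead of splitting, reversing the word list and reversing each word separately, B reverses the whole stripped string once and splits that, using the identity that a global reversal equals reversing word order plus letters within words.
import Mathlib
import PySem

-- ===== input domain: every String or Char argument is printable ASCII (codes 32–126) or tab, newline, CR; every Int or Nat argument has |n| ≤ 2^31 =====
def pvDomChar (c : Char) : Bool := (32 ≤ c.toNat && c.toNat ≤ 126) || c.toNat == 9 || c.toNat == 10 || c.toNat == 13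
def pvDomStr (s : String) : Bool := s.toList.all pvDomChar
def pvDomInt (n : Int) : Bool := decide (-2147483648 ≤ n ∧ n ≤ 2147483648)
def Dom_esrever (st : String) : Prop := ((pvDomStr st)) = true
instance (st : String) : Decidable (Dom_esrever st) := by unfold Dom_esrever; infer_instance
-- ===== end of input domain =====

-- B replaces "reverse the word list, then reverse each word" by one global reversal of the
-- stripped string followed by split(); objective: simpler.

-- ===== PORT A =====
def esrever (st : String) : String :=
  let cs := st.toList
  -- if st and st[-1] in ('!','?','.'): punct = st[-1]; st = st[:-1]  else: punct = ''
  let pc : List Char × List Char :=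
    match PySem.List.pyGet? cs (-1) with
    | some c =>
        if c = '!' ∨ c = '?' ∨ c = '.' then ([c], PySem.List.slice cs none (some (-1)))
        else ([], cs)
    | none => ([], cs)
  -- words = st.split(); reversed_words = [word[::-1] for word in words[::-1]]
  let words := PySem.Chars.split₀ pc.2
  let reversedWords :=
    ((PySem.List.slice? words none none (-1)).getD []).map
      (fun w => (PySem.List.slice? w none none (-1)).getD [])
  -- result = ' '.join(reversed_words) + punct
  String.ofList (PySem.Chars.join [' '] reversedWords ++ pc.1)

-- ===== PORT B =====
def esrever_alt (st : String) : String :=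
  let cs := st.toList
  -- penult = st[:-1]
  let penult := PySem.List.slice cs none (some (-1))
  match PySem.List.pyGet? cs (-1) with
  | some c =>
      if c = '!' ∨ c = '?' ∨ c = '.' then
        -- return ' '.join(penult[::-1].split()) + st[-1]
        String.ofList
          (PySem.Chars.join [' ']
            (PySem.Chars.split₀ ((PySem.List.slice? penult none none (-1)).getD [])) ++ [c])
      else
        -- return ' '.join(st[::-1].split())
        String.ofList
          (PySem.Chars.join [' ']
            (PySem.Chars.split₀ ((PySem.List.slice? cs none none (-1)).getD [])))
  | none =>
      String.ofList
        (PySem.Chars.join [' ']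
          (PySem.Chars.split₀ ((PySem.List.slice? cs none none (-1)).getD [])))

-- ===== PRECONDITION & SPEC =====
def Spec_esrever (st : String) (out : String) : Prop := out = esrever_alt st
instance (st : String) (out : String) : Decidable (Spec_esrever st out) := by unfold Spec_esrever; infer_instance

-- ===== CLAIM (what is proved, stated in full; the proofs are below) =====
def Claim_equal_esrever : Prop := ∀ (st : String), Dom_esrever st → Spec_esrever st (esrever st)

-- ===== LEMMAS AND PROOFS =====
def wsplit : List Char → List (List Char)
  | [] => []
  | c :: rest =>
    if PySem.Chars.isspace c then wsplit rest
    else (c :: rest.takeWhile (fun d => !PySem.Chars.isspace d)) ::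
         wsplit (rest.dropWhile (fun d => !PySem.Chars.isspace d))
termination_by l => l.length
decreasing_by
  all_goals
    (have := List.length_dropWhile_le (fun d => !PySem.Chars.isspace d) rest; simp; try omega)

theorem split₀_go_eq (s cur : List Char) (acc : List (List Char)) :
    PySem.Chars.split₀.go s cur acc =
      acc.reverse ++
        (if cur = [] then wsplit s
         else (cur.reverse ++ s.takeWhile (fun d => !PySem.Chars.isspace d)) ::
              wsplit (s.dropWhile (fun d => !PySem.Chars.isspace d))) := by
  induction s generalizing cur acc with
  | nil =>
    by_cases h : cur = []
    · simp [PySem.Chars.split₀.go, wsplit, h]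
    · simp [PySem.Chars.split₀.go, wsplit, h, List.isEmpty_iff]
  | cons c rest ih =>
    by_cases hc : PySem.Chars.isspace c
    · by_cases hcur : cur = []
      · subst hcur
        simp [PySem.Chars.split₀.go, hc, ih, wsplit]
      · simp [PySem.Chars.split₀.go, hc, List.isEmpty_iff, hcur, ih, wsplit]
    · rw [show PySem.Chars.split₀.go (c :: rest) cur acc
            = PySem.Chars.split₀.go rest (c :: cur) acc from by
          simp [PySem.Chars.split₀.go, hc], ih]
      by_cases hcur : cur = []
      · subst hcur; simp [wsplit, hc]
      · simp [hcur, hc]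

theorem split₀_eq_wsplit (l : List Char) : PySem.Chars.split₀ l = wsplit l := by
  simpa using split₀_go_eq l [] []

theorem tw_dw_append (a b : List Char) (h : ∃ x ∈ a, PySem.Chars.isspace x = true) :
    (a ++ b).takeWhile (fun d => !PySem.Chars.isspace d)
        = a.takeWhile (fun d => !PySem.Chars.isspace d) ∧
    (a ++ b).dropWhile (fun d => !PySem.Chars.isspace d)
        = a.dropWhile (fun d => !PySem.Chars.isspace d) ++ b := by
  induction a with
  | nil => simp at h
  | cons x a ih =>
    by_cases hx : PySem.Chars.isspace x
    · simp [hx]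
    · obtain ⟨y, hy, hys⟩ := h
      have hy' : y ∈ a := by
        rcases hy with _ | hy
        · simp_all
        · assumption
      obtain ⟨h1, h2⟩ := ih ⟨y, hy', hys⟩
      simp [hx, h1, h2]

theorem wsplit_all_nonspace (l : List Char) (hne : l ≠ [])
    (h : ∀ x ∈ l, PySem.Chars.isspace x = false) : wsplit l = [l] := by
  cases l with
  | nil => simp at hne
  | cons c rest =>
    have hc : PySem.Chars.isspace c = false := h c (by simp)
    rw [wsplit]
    simp only [hc, Bool.false_eq_true, if_false]
    have ht : rest.takeWhile (fun d => !PySem.Chars.isspace d) = rest :=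
      List.takeWhile_eq_self_iff.mpr (by intro x hx; simp [h x (by simp [hx])])
    have hd : rest.dropWhile (fun d => !PySem.Chars.isspace d) = [] :=
      List.dropWhile_eq_nil_iff.mpr (by intro x hx; simp [h x (by simp [hx])])
    simp [ht, hd, wsplit]


theorem tw_dw_snoc_nonspace (r : List Char) (c : Char)
    (h : ∀ x ∈ r, PySem.Chars.isspace x = false) :
    (r ++ [c]).takeWhile (fun d => !PySem.Chars.isspace d)
        = r ++ [c].takeWhile (fun d => !PySem.Chars.isspace d) ∧
    (r ++ [c]).dropWhile (fun d => !PySem.Chars.isspace d)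
        = [c].dropWhile (fun d => !PySem.Chars.isspace d) := by
  induction r with
  | nil => simp
  | cons x r ih =>
    have hx := h x (by simp)
    obtain ⟨h1, h2⟩ := ih (fun y hy => h y (by simp [hy]))
    simp [hx, h1, h2]

theorem wsplit_snoc_space (xs : List Char) (c : Char) (hc : PySem.Chars.isspace c = true) :
    wsplit (xs ++ [c]) = wsplit xs := by
  fun_induction wsplit xs with
  | case1 => simp [wsplit, hc]
  | case2 d rest hd ih => simpa [wsplit, hd] using ih
  | case3 d rest hd ih =>
    rw [show (d :: rest) ++ [c] = d :: (rest ++ [c]) from rfl, wsplit]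
    simp only [hd, Bool.false_eq_true, if_false]
    by_cases hall : ∀ x ∈ rest, PySem.Chars.isspace x = false
    · obtain ⟨h1, h2⟩ := tw_dw_snoc_nonspace rest c hall
      have ht : rest.takeWhile (fun d => !PySem.Chars.isspace d) = rest := by
        rw [List.takeWhile_eq_self_iff]; intro x hx; simp [hall x hx]
      have hdd : rest.dropWhile (fun d => !PySem.Chars.isspace d) = [] := by
        rw [List.dropWhile_eq_nil_iff]; intro x hx; simp [hall x hx]
      rw [h1, h2, ht, hdd]
      simp [hc, wsplit]
    · have hex : ∃ x ∈ rest, PySem.Chars.isspace x = true := by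
        push Not at hall
        obtain ⟨x, hx, hxs⟩ := hall
        exact ⟨x, hx, by simpa using hxs⟩
      obtain ⟨h1, h2⟩ := tw_dw_append rest [c] hex
      rw [h1, h2, ih]

theorem getLast?_cons_ne (a : Char) (l : List Char) (h : l ≠ []) :
    (a :: l).getLast? = l.getLast? := by
  simpa using List.getLast?_append_of_ne_nil [a] (l₂ := l) h

theorem wsplit_append_word (xs ys : List Char) (hys : ys ≠ [])
    (hy : ∀ x ∈ ys, PySem.Chars.isspace x = false)
    (hx : ∀ c, xs.getLast? = some c → PySem.Chars.isspace c = true) :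
    wsplit (xs ++ ys) = wsplit xs ++ [ys] := by
  fun_induction wsplit xs with
  | case1 => simpa [wsplit] using wsplit_all_nonspace ys hys hy
  | case2 d rest hd ih =>
    have hx' : ∀ c, rest.getLast? = some c → PySem.Chars.isspace c = true := by
      intro c hcl
      apply hx
      cases rest with
      | nil => simp at hcl
      | cons a b => rwa [getLast?_cons_ne d (a :: b) (by simp)]
    rw [List.cons_append]
    have h2 := ih hx'
    simp only [wsplit, hd, if_true]
    exact h2
  | case3 d rest hd ih =>
    have hrest : rest ≠ [] := by
      rintro rfl
      exact hd (by simpa using hx d (by simp))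
    have hlast : ∃ e, rest.getLast? = some e ∧ PySem.Chars.isspace e = true := by
      obtain ⟨e, he⟩ := Option.isSome_iff_exists.mp (List.getLast?_isSome.mpr hrest)
      exact ⟨e, he, hx e (by rwa [getLast?_cons_ne d rest hrest])⟩
    obtain ⟨e, he, hes⟩ := hlast
    have hmem : e ∈ rest := List.mem_of_getLast? he
    obtain ⟨h1, h2⟩ := tw_dw_append rest ys ⟨e, hmem, hes⟩
    have hdw_ne : rest.dropWhile (fun d => !PySem.Chars.isspace d) ≠ [] := by
      intro h0
      have := List.dropWhile_eq_nil_iff.mp h0 e hmem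
      simp [hes] at this
    have hdw_last : ∀ c, (rest.dropWhile (fun d => !PySem.Chars.isspace d)).getLast? = some c →
        PySem.Chars.isspace c = true := by
      intro c hcl
      apply hx c
      have hsplit := List.takeWhile_append_dropWhile (p := fun d => !PySem.Chars.isspace d) (l := rest)
      rw [getLast?_cons_ne d rest hrest, ← hsplit, List.getLast?_append_of_ne_nil _ hdw_ne]
      exact hcl
    have hih := ih hdw_last
    rw [List.cons_append]
    rw [wsplit]
    simp only [hd, Bool.false_eq_true, if_false]
    rw [h1, h2, hih]
    simp

theorem wsplit_reverse (l : List Char) :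
    wsplit l.reverse = (wsplit l).reverse.map List.reverse := by
  fun_induction wsplit l with
  | case1 => simp [wsplit]
  | case2 c rest hc ih =>
    rw [List.reverse_cons, wsplit_snoc_space rest.reverse c (by simpa using hc), ih]
  | case3 c rest hc ih =>
    have hsplit := List.takeWhile_append_dropWhile (p := fun d => !PySem.Chars.isspace d) (l := rest)
    have hrev : (c :: rest).reverse
        = (rest.dropWhile (fun d => !PySem.Chars.isspace d)).reverse
          ++ ((rest.takeWhile (fun d => !PySem.Chars.isspace d)).reverse ++ [c]) := by
      rw [List.reverse_cons, ← List.append_assoc, ← List.reverse_append, hsplit]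
    rw [hrev, wsplit_append_word _ _ (by simp)
      (by
        intro x hxm
        rcases List.mem_append.mp hxm with hxw | hxc
        · have := List.mem_takeWhile_imp (List.mem_reverse.mp hxw)
          simpa using this
        · have : x = c := by simpa using hxc
          subst this
          simpa using hc)
      (by
        intro e he
        rw [List.getLast?_reverse] at he
        cases hrr : rest.dropWhile (fun d => !PySem.Chars.isspace d) with
        | nil => rw [hrr] at he; simp at he
        | cons a b =>
          rw [hrr] at he
          simp only [List.head?_cons, Option.some.injEq] at he
          subst he
          have hhd := List.head?_dropWhile_not (p := fun d => !PySem.Chars.isspace d) (l := rest)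
          rw [hrr] at hhd
          simpa using hhd), ih]
    simp

-- A's word-level work equals B's global reversal: [w[::-1] for w in cs.split()[::-1]] = cs[::-1].split()
theorem split_map_reverse_core (cs : List Char) :
    ((PySem.List.slice? (PySem.Chars.split₀ cs) none none (-1)).getD []).map
        (fun w => (PySem.List.slice? w none none (-1)).getD [])
      = PySem.Chars.split₀ ((PySem.List.slice? cs none none (-1)).getD []) := by
  simp only [PySem.List.slice?_none_none_neg_one, Option.getD_some]
  rw [split₀_eq_wsplit, split₀_eq_wsplit, wsplit_reverse]

-- ===== VERDICT (by name: the statement is the Claim_ definition above) =====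
theorem esrever_spec : Claim_equal_esrever := by
  unfold Claim_equal_esrever Spec_esrever
  intro st _
  unfold esrever esrever_alt
  cases h : PySem.List.pyGet? st.toList (-1) with
  | none => simp [h, split_map_reverse_core]
  | some c =>
    by_cases hc : c = '!' ∨ c = '?' ∨ c = '.'
    · simp only [h, hc, if_true]
      rw [split_map_reverse_core]
    · simp [h, hc, split_map_reverse_core]
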